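/- GENERATED by farm/mkstatement.py from design/units.tsv (unit `DGifOpen.1`) and the assertions of Gif/Spec/Seg_DGifOpen.lean — do not edit.
   THE STATEMENT of the proof unit `DGifOpen.1`: segment 1 of `DGifOpen` (21 instructions; entries 0x1086d0;
   exits 0x10871a,0x108816; ranges 0x1086d0-0x10871a,0x108834-0x10884b)
   takes each of its entry assertions to one of its exit assertions (`Gif.Spec.DGifOpen.Seg1`), given the contracts of its callees.
   What the names mean: ProgX/Base/Spec/Basic.lean (the shared hypotheses), Gif/Spec/Seg_DGifOpen.lean (the assertions). The theorem to prove: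
   `theorem DGifOpen_1_ok : Gif.Spec.DGifOpen_1.Statement`. -/
import Gif.Code
import Gif.Dec.All
import Gif.Labels
import Gif.Spec.Seg_DGifOpen
import ProgX.Base.Spec.Heap
import ProgX.Base.Spec.Libc
namespace Gif.Spec.DGifOpen_1
open X86 X86.User Asan

/-- The statement of unit `DGifOpen.1`. -/
def Statement : Prop :=
  ∀ (Lay : Layout) (_hLay : Lay.hi = 0x1000000) (μ : Microarch) (_hμ : UserX.MicroOK μ) (u₀ : State)
    (_hcode : HasCodeNat Lay u₀ Gif.L.DGifOpen.entry Gif.Code.code_DGifOpen.nat Gif.L.DGifOpen.size)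
    (_h_malloc : ∀ (H : Heap) (rest : List Obj) (frames : List (Nat × FrameLayout)), Calls Lay μ ProgX.Base.WayInv (ProgX.Base.conv u₀) ProgX.Base.L.malloc.entry (ProgX.Base.Spec.malloc.spec H rest frames))
    (_h_memset : ∀ (others : List Obj) (frames : List (Nat × FrameLayout)), Calls Lay μ ProgX.Base.WayInv (ProgX.Base.conv u₀) ProgX.Base.L.memset.entry (ProgX.Base.Spec.memset.spec others frames))
    (_h_asan_store8_noabort : Asan.SmallCheck Lay μ ProgX.Base.WayInv (ProgX.Base.CodeOK u₀) [.rax, .rcx, .rdx] 8 ProgX.Base.L.__asan_store8_noabort.entry)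
    (_h_asan_store4_noabort : Asan.SmallCheck Lay μ ProgX.Base.WayInv (ProgX.Base.CodeOK u₀) [.rax, .rcx, .rdx] 4 ProgX.Base.L.__asan_store4_noabort.entry),
    Gif.Spec.DGifOpen.Seg1 Lay μ u₀

end Gif.Spec.DGifOpen_1
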